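-- pv_equiv track=rewrite | github.com/TKinVT/searchr | scraper.py | clean_search_term
-- ===== SOURCE A (Python) =====
-- import string
--
-- def clean_search_term(search_term):
--     cleaner = ""
--     for char in search_term:
--         if char in string.ascii_letters or char in string.digits \
--         or char in string.whitespace or char == '"':
--             cleaner += char
--     new_term = cleaner.replace(' ', '%20')
--     return new_term
-- ===== SOURCE B (Python) =====
-- import re
--
-- _DISALLOWED = re.compile(r'[^A-Za-z0-9\s"]', flags=re.ASCII)
--
-- def clean_search_term(search_term):
--     return _DISALLOWED.sub('', search_term).replace(' ', '%20')
-- ===== Notes on version B (the rewrite author's own statement) =====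
-- stated objective: idiomatic
-- what changed: Replaces the explicit per-character loop with string concatenation by a single compiled-regex substitution stripping every disallowed character ([^A-Za-z0-9\s"] with re.ASCII), followed by the same ' '->'%20' replace.
import Mathlib
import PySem

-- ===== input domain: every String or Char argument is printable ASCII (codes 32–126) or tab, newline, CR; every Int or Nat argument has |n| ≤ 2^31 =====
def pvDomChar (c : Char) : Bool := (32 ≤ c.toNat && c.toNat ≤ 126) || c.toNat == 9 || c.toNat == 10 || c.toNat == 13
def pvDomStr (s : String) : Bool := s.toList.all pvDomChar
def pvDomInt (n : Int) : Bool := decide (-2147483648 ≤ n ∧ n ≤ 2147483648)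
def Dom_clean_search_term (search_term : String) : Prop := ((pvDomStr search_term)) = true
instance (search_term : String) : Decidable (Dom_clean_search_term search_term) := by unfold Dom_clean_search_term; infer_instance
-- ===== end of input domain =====

-- B replaces A's per-character accumulation loop by a regex-style class filter (one filter pass) before the same space→%20 replace; objective: idiomatic.


-- ===== PORT A =====
-- string.ascii_letters, string.digits, string.whitespace (Python's exact contents)
def pvAsciiLetters : List Char := ['a', 'b', 'c', 'd', 'e', 'f', 'g', 'h', 'i', 'j', 'k', 'l', 'm', 'n', 'o', 'p', 'q', 'r', 's', 't', 'u', 'v', 'w', 'x', 'y', 'z', 'A', 'B', 'C', 'D', 'E', 'F', 'G', 'H', 'I', 'J', 'K', 'L', 'M', 'N', 'O', 'P', 'Q', 'R', 'S', 'T', 'U', 'V', 'W', 'X', 'Y', 'Z']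
def pvDigits : List Char := ['0', '1', '2', '3', '4', '5', '6', '7', '8', '9']
def pvWhitespace : List Char := [' ', '\t', '\n', '\x0d', '\x0b', '\x0c']

def clean_search_term (search_term : String) : String :=
  let cleaner : List Char := search_term.toList.foldl
    (fun acc c =>
      if c ∈ pvAsciiLetters || c ∈ pvDigits || c ∈ pvWhitespace || c == '"' then acc ++ [c]
      else acc) []
  PySem.Str.replace (String.ofList cleaner) " " "%20"

-- ===== PORT B =====
-- the regex character class [^A-Za-z0-9\s"] with re.ASCII: char codes, as the engine matches them
def pvRegexKeep (c : Char) : Bool :=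
  (65 ≤ c.toNat && c.toNat ≤ 90) || (97 ≤ c.toNat && c.toNat ≤ 122) ||
  (48 ≤ c.toNat && c.toNat ≤ 57) ||
  c.toNat == 32 || (9 ≤ c.toNat && c.toNat ≤ 13) || c.toNat == 34

def clean_search_term_alt (search_term : String) : String :=
  PySem.Str.replace (String.ofList (search_term.toList.filter pvRegexKeep)) " " "%20"

-- ===== PRECONDITION & SPEC =====
def Spec_clean_search_term (search_term : String) (out : String) : Prop := out = clean_search_term_alt search_term
instance (search_term : String) (out : String) : Decidable (Spec_clean_search_term search_term out) := by unfold Spec_clean_search_term; infer_instance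

-- ===== CLAIM (what is proved, stated in full; the proofs are below) =====
def Claim_equal_clean_search_term : Prop := ∀ (search_term : String), Dom_clean_search_term search_term → Spec_clean_search_term search_term (clean_search_term search_term)

-- ===== LEMMAS AND PROOFS =====

-- A's membership test agrees with the regex class on every character (in fact on all of Char;
-- proved here by enumeration over codes < 128 plus the range argument for codes ≥ 128)
theorem pvCharEq {c : Char} {n : Nat} (h : c.toNat = n) : c = Char.ofNat n := by
  rw [← h, Char.ofNat_toNat]

set_option maxRecDepth 8000 in
theorem pvPredLow : ∀ n : Nat, n < 128 →
    ((Char.ofNat n ∈ pvAsciiLetters || Char.ofNat n ∈ pvDigits || Char.ofNat n ∈ pvWhitespace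
      || Char.ofNat n == '"') = pvRegexKeep (Char.ofNat n)) := by
  intro n hn
  interval_cases n <;> decide

theorem pvPred_eq (c : Char) :
    (c ∈ pvAsciiLetters || c ∈ pvDigits || c ∈ pvWhitespace || c == '"') = pvRegexKeep c := by
  by_cases h : c.toNat < 128
  · have hc : c = Char.ofNat c.toNat := pvCharEq rfl
    rw [hc]; exact pvPredLow c.toNat h
  · replace h : 128 ≤ c.toNat := by omega
    have hA : c ∉ pvAsciiLetters := by
      intro hc; fin_cases hc <;> exact absurd h (by decide)
    have hD : c ∉ pvDigits := by
      intro hc; fin_cases hc <;> exact absurd h (by decide)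
    have hW : c ∉ pvWhitespace := by
      intro hc; fin_cases hc <;> exact absurd h (by decide)
    have hQ : (c == '"') = false := by
      simp only [beq_eq_false_iff_ne]; intro hc; subst hc; simp at h
    simp only [hQ, pvRegexKeep]
    simp [hA, hD, hW]
    omega

-- ===== VERDICT (by name: the statement is the Claim_ definition above) =====
theorem clean_search_term_spec : Claim_equal_clean_search_term := by
  intro s _
  unfold Spec_clean_search_term clean_search_term clean_search_term_alt
  have h := PySem.List.foldl_append_if_eq_filter
    (l := s.toList)
    (p := fun c => c ∈ pvAsciiLetters || c ∈ pvDigits || c ∈ pvWhitespace || c == '"')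
    (acc := [])
  simp only [h, List.nil_append]
  exact congrArg (fun l => PySem.Str.replace (String.ofList l) " " "%20")
    (List.filter_congr (fun c _ => pvPred_eq c))
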